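-- pv_equiv track=rewrite | github.com/TheWisker/BoardToe | src/core.py | row_check
-- ===== SOURCE A (Python) =====
-- def rotate_index(inx: list[int, int], depth: int, cw: bool = False) -> list[int, int]:
--     """
--     Parameters:
--         index: The index as [x, y]
--         matrix_depth: The matrix length,
--         backwards: If it should rotate backwards or forwards
--     Example:
--         rotate_index([0,0], 3, False) -> [2,0]
--     """
--     r: list = [inx[0], inx[1]]
--     r[1] = r[0]
--     r[0] = depth-1-inx[1]
--     return r if not cw else [r[1], r[0]]
--
-- def row_check(matrix: list[list[int]], n: int, rt: bool = False) -> list[tuple[int, list[int]]] | None: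
--     "Function that returns a list with the horizontal win positions for a player"
--     r: list = []
--     for k,v in enumerate(matrix):
--         if (len(set(v)) == 2 and all(x in set(v) for x in [-1, n])) or (len(set(v)) == 1 and v[0] == -1):
--             rr: list = []
--             for kk,vv in enumerate(v):
--                 if vv == -1:
--                     rr.append(rotate_index([k, kk], len(matrix)) if rt else [k, kk])
--             r.append((v.count(-1), rr))
--     return r if r else [None]
-- ===== SOURCE B (Python) =====
-- def row_check(matrix, n, rt=False):
--     "Single pass per row: validity flag + -1 counter + positions, no set/count/extra scans."
--     depth = len(matrix)
--     res = []
--     for k, v in enumerate(matrix):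
--         ok = True
--         cnt = 0
--         pos = []
--         for kk, vv in enumerate(v):
--             if vv == -1:
--                 cnt += 1
--                 pos.append([depth - 1 - kk, k] if rt else [k, kk])
--             elif vv != n:
--                 ok = False
--         if ok and cnt > 0:
--             res.append((cnt, pos))
--     return res or [None]
-- ===== Notes on version B (the rewrite author's own statement) =====
-- stated objective: simpler
-- what changed: Each row is judged in one pass maintaining a validity flag, a -1 counter and the position list (rotation inlined), instead of building set(v), re-scanning it with membership tests, a separate position loop and a v.count(-1) pass.
-- outside the precondition, e.g. on row_check([[-1, 5]], -1, False): A returns [(1, [[0, 0]])], B returns [None]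
import Mathlib
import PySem

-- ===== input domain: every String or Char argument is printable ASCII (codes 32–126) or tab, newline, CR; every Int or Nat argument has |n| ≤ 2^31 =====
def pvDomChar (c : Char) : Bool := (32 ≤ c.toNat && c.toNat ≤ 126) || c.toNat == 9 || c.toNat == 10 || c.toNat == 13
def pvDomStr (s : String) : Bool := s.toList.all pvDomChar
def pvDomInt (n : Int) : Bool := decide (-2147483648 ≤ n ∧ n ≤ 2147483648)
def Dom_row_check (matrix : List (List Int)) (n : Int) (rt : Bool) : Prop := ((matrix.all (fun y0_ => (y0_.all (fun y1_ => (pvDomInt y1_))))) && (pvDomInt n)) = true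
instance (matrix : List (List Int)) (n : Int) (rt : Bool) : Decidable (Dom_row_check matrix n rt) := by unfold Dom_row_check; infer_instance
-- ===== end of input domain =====

-- B replaces A's per-row set(v)+membership scans+position loop+count by ONE pass per row
-- keeping a validity flag, a -1 counter and the position list (objective: simpler).

-- ===== PORT A =====
-- rotate_index is only ever called with a 2-element inx and cw=False; pyGetD/pySetD at the
-- in-range indexes 0 and 1 are Python-exact there.
def rotate_index (inx : List Int) (depth : Int) (cw : Bool) : List Int :=
  let r : List Int := [PySem.List.pyGetD inx 0 0, PySem.List.pyGetD inx 1 0]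
  let r := PySem.List.pySetD r 1 (PySem.List.pyGetD r 0 0)
  let r := PySem.List.pySetD r 0 (depth - 1 - PySem.List.pyGetD inx 1 0)
  if !cw then r else [PySem.List.pyGetD r 1 0, PySem.List.pyGetD r 0 0]

-- v[0] is only evaluated by Python when len(set(v)) == 1, i.e. v nonempty: pyGetD is exact there.
def row_check (matrix : List (List Int)) (n : Int) (rt : Bool) : List (Option (Int × List (List Int))) :=
  let r := (PySem.List.enumerate matrix).foldl (fun r kv =>
      let k := kv.1
      let v := kv.2
      if ((PySem.Set.len (PySem.Set.ofList v) == 2 &&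
            ([(-1 : Int), n].all (fun x => PySem.Set.contains (PySem.Set.ofList v) x))) ||
          (PySem.Set.len (PySem.Set.ofList v) == 1 && PySem.List.pyGetD v 0 0 == -1)) then
        let rr := (PySem.List.enumerate v).foldl (fun rr kv2 =>
            if kv2.2 == -1 then
              rr ++ [if rt then rotate_index [k, kv2.1] (matrix.length : Int) false else [k, kv2.1]]
            else rr) ([] : List (List Int))
        r ++ [some ((PySem.List.count v (-1) : Int), rr)]
      else r) ([] : List (Option (Int × List (List Int))))
  if r = [] then [none] else r

-- ===== PORT B =====
def row_check_alt (matrix : List (List Int)) (n : Int) (rt : Bool) : List (Option (Int × List (List Int))) :=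
  let depth : Int := matrix.length
  let res := (PySem.List.enumerate matrix).foldl (fun res kv =>
      let k := kv.1
      let st := (PySem.List.enumerate kv.2).foldl
        (fun (st : Bool × Int × List (List Int)) kv2 =>
          if kv2.2 == -1 then
            (st.1, st.2.1 + 1, st.2.2 ++ [if rt then [depth - 1 - kv2.1, k] else [k, kv2.1]])
          else if kv2.2 != n then (false, st.2.1, st.2.2)
          else st)
        ((true, 0, []) : Bool × Int × List (List Int))
      if st.1 && decide (0 < st.2.1) then res ++ [some (st.2.1, st.2.2)] else res)
    ([] : List (Option (Int × List (List Int))))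
  if res = [] then [none] else res

-- ===== PRECONDITION & SPEC =====
-- Pre_ excludes n = -1, where the player's mark coincides with the empty-cell sentinel -1:
-- no behaviour is specified for that degenerate corner (A accepts any row with exactly two
-- distinct values containing -1, B only all--1 rows).
def Pre_row_check (matrix : List (List Int)) (n : Int) (rt : Bool) : Prop := n ≠ -1
instance (matrix : List (List Int)) (n : Int) (rt : Bool) : Decidable (Pre_row_check matrix n rt) := by unfold Pre_row_check; infer_instance
def pvWitness_row_check : List (List Int) × Int × Bool := ([[-1, 0], [-1, -1]], 0, false)

def Spec_row_check (matrix : List (List Int)) (n : Int) (rt : Bool) (out : List (Option (Int × List (List Int)))) : Prop := out = row_check_alt matrix n rt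
instance (matrix : List (List Int)) (n : Int) (rt : Bool) (out : List (Option (Int × List (List Int)))) : Decidable (Spec_row_check matrix n rt out) := by unfold Spec_row_check; infer_instance

-- ===== CLAIM (what is proved, stated in full; the proofs are below) =====
def Claim_equal_row_check : Prop := ∀ (matrix : List (List Int)) (n : Int) (rt : Bool), Dom_row_check matrix n rt → Pre_row_check matrix n rt → Spec_row_check matrix n rt (row_check matrix n rt)

-- ===== LEMMAS AND PROOFS =====

-- the per-row position list both inner loops build
def posAcc (g : Int → List Int) : List Int → Int → List (List Int)
  | [], _ => []
  | x :: xs, i => (if x == -1 then [g i] else []) ++ posAcc g xs (i + 1)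

theorem rot_eq (k kk d : Int) : rotate_index [k, kk] d false = [d - 1 - kk, k] := rfl

theorem innerA (g : Int → List Int) (v : List Int) (i : Int) (acc : List (List Int)) :
    (PySem.List.enumerate v i).foldl
      (fun rr kv2 => if kv2.2 == -1 then rr ++ [g kv2.1] else rr) acc
    = acc ++ posAcc g v i := by
  induction v generalizing i acc with
  | nil => simp [PySem.List.enumerate_nil, posAcc]
  | cons x xs ih =>
    simp only [PySem.List.enumerate_cons, List.foldl_cons, posAcc]
    cases hx : (x == -1)
    · rw [if_neg (by simp [hx]), if_neg (by simp [hx]), ih]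
      simp
    · rw [if_pos (by simp [hx]), if_pos (by simp [hx]), ih]
      simp

theorem innerB (n : Int) (g : Int → List Int) (v : List Int) (i : Int)
    (ok : Bool) (c : Int) (p : List (List Int)) :
    (PySem.List.enumerate v i).foldl
      (fun (st : Bool × Int × List (List Int)) kv2 =>
        if kv2.2 == -1 then (st.1, st.2.1 + 1, st.2.2 ++ [g kv2.1])
        else if kv2.2 != n then (false, st.2.1, st.2.2)
        else st) (ok, c, p)
    = (ok && v.all (fun x => x == -1 || x == n),
       c + (PySem.List.count v (-1) : Int), p ++ posAcc g v i) := by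
  induction v generalizing i ok c p with
  | nil => simp [PySem.List.enumerate_nil, posAcc, PySem.List.count_eq]
  | cons x xs ih =>
    simp only [PySem.List.enumerate_cons, List.foldl_cons]
    cases hx : (x == -1)
    · rw [if_neg (by simp [hx])]
      cases hn : (x == n)
      · rw [if_pos (by simp [bne, hn]), ih]
        simp [posAcc, hx, hn, PySem.List.count_eq, List.count_cons]
      · rw [if_neg (by simp [bne, hn]), ih]
        simp [posAcc, hx, hn, PySem.List.count_eq, List.count_cons]
    · rw [if_pos (by simp [hx]), ih]
      simp [posAcc, hx, PySem.List.count_eq, List.count_cons]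
      omega

theorem cond_eq (v : List Int) (n : Int) (hn : n ≠ -1) :
    ((PySem.Set.len (PySem.Set.ofList v) == 2 &&
        ([(-1 : Int), n].all (fun x => PySem.Set.contains (PySem.Set.ofList v) x))) ||
      (PySem.Set.len (PySem.Set.ofList v) == 1 && PySem.List.pyGetD v 0 0 == -1))
    = (v.all (fun x => x == -1 || x == n) && decide (0 < (PySem.List.count v (-1) : Int))) := by
  rw [Bool.eq_iff_iff]
  simp only [Bool.or_eq_true, Bool.and_eq_true, beq_iff_eq, List.all_eq_true, List.mem_cons,
    List.not_mem_nil, or_false, decide_eq_true_eq, PySem.Set.contains_iff, PySem.Set.mem_ofList,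
    PySem.List.pyGetD_zero, PySem.List.count_eq, PySem.Set.len, Bool.or_eq_true, forall_eq_or_imp, forall_eq]
  constructor
  · rintro (⟨h2, hm1, hmn⟩ | ⟨h1, h0⟩)
    · refine ⟨?_, ?_⟩
      · intro x hx
        by_contra hc
        push Not at hc
        obtain ⟨hx1, hxn⟩ := hc
        have hsub : ([x, -1, n] : List Int) ⊆ PySem.Set.ofList v := by
          intro y hy
          simp only [List.mem_cons, List.not_mem_nil, or_false] at hy
          rcases hy with rfl | rfl | rfl <;> rw [PySem.Set.mem_ofList]
          · exact hx
          · exact hm1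
          · exact hmn
        have hnd : ([x, -1, n] : List Int).Nodup := by simp [hx1, hxn, Ne.symm hn]
        have hle := (hnd.subperm hsub).length_le
        have h2' : (PySem.Set.ofList v).length = 2 := by exact_mod_cast h2
        simp [h2'] at hle
      · rw [Int.natCast_pos, List.count_pos_iff]
        exact hm1
    · have h1' : (PySem.Set.ofList v).length = 1 := by exact_mod_cast h1
      obtain ⟨y, hy⟩ := List.length_eq_one_iff.mp h1'
      cases v with
      | nil => simp [PySem.Set.ofList] at h1'
      | cons a as =>
        have ha : a = y := by
          have : a ∈ PySem.Set.ofList (a :: as) := (PySem.Set.mem_ofList _ _).mpr (by simp)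
          rw [hy] at this
          simpa using this
        have h0' : a = -1 := by simpa using h0
        constructor
        · intro x hx
          have hxm : x ∈ PySem.Set.ofList (a :: as) := (PySem.Set.mem_ofList _ _).mpr hx
          rw [hy] at hxm
          simp only [List.mem_cons, List.not_mem_nil, or_false] at hxm
          left
          rw [hxm, ← ha, h0']
        · rw [Int.natCast_pos, List.count_pos_iff, ← h0']
          simp
  · rintro ⟨hall, hc⟩
    have hm1 : (-1 : Int) ∈ v := List.count_pos_iff.mp (by exact_mod_cast hc)
    by_cases hmn : n ∈ v
    · left
      refine ⟨?_, hm1, hmn⟩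
      have hperm : (PySem.Set.ofList v).Perm [-1, n] := by
        rw [List.perm_ext_iff_of_nodup (PySem.Set.nodup_ofList v) (by simp [Ne.symm hn])]
        intro a
        rw [PySem.Set.mem_ofList]
        simp only [List.mem_cons, List.not_mem_nil, or_false]
        constructor
        · intro ha
          exact hall a ha
        · rintro (rfl | rfl)
          · exact hm1
          · exact hmn
      simp [hperm.length_eq]
    · right
      have hall1 : ∀ x ∈ v, x = -1 := by
        intro x hx
        rcases hall x hx with h | h
        · exact h
        · exact absurd (h ▸ hx) hmn
      have hperm : (PySem.Set.ofList v).Perm [-1] := by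
        rw [List.perm_ext_iff_of_nodup (PySem.Set.nodup_ofList v) (by simp)]
        intro a
        rw [PySem.Set.mem_ofList]
        simp only [List.mem_cons, List.not_mem_nil, or_false]
        constructor
        · intro ha
          exact hall1 a ha
        · rintro rfl
          exact hm1
      constructor
      · simp [hperm.length_eq]
      · cases v with
        | nil => simp at hm1
        | cons a as => simpa using hall1 a (by simp)



theorem body_eq (n d : Int) (hn : n ≠ -1) (rt : Bool) (k : Int) (v : List Int)
    (acc : List (Option (Int × List (List Int)))) :
    (if ((PySem.Set.len (PySem.Set.ofList v) == 2 &&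
          ([(-1 : Int), n].all (fun x => PySem.Set.contains (PySem.Set.ofList v) x))) ||
        (PySem.Set.len (PySem.Set.ofList v) == 1 && PySem.List.pyGetD v 0 0 == -1)) then
      acc ++ [some ((PySem.List.count v (-1) : Int),
        (PySem.List.enumerate v).foldl (fun rr kv2 =>
          if kv2.2 == -1 then
            rr ++ [if rt then rotate_index [k, kv2.1] d false else [k, kv2.1]]
          else rr) ([] : List (List Int)))]
    else acc)
    =
    (let st := (PySem.List.enumerate v).foldl
        (fun (st : Bool × Int × List (List Int)) kv2 =>
          if kv2.2 == -1 then
            (st.1, st.2.1 + 1, st.2.2 ++ [if rt then [d - 1 - kv2.1, k] else [k, kv2.1]])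
          else if kv2.2 != n then (false, st.2.1, st.2.2)
          else st)
        ((true, 0, []) : Bool × Int × List (List Int))
      if st.1 && decide (0 < st.2.1) then acc ++ [some (st.2.1, st.2.2)] else acc) := by
  have hg : (fun kk => if rt then rotate_index [k, kk] d false else [k, kk])
      = (fun kk => if rt then [d - 1 - kk, k] else [k, kk]) := by
    funext kk; rw [rot_eq]
  rw [innerA (fun kk => if rt then rotate_index [k, kk] d false else [k, kk]) v 0 []]
  rw [innerB n (fun kk => if rt then [d - 1 - kk, k] else [k, kk]) v 0 true 0 []]
  rw [hg, cond_eq v n hn]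
  simp

-- ===== VERDICT (by name: the statement is the Claim_ definition above) =====
theorem row_check_spec : Claim_equal_row_check := by
  intro matrix n rt _ hpre
  unfold Spec_row_check row_check row_check_alt
  rw [PySem.List.foldl_congr_mem' (PySem.List.enumerate matrix) _ _ _
    (fun kv _ acc => body_eq n (matrix.length : Int) hpre rt kv.1 kv.2 acc)]
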